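-- pv_equiv track=rewrite | github.com/LindaQuelex/LFP-VJ-201403745-P1 | PROYECTO/P1/analizador_léxico.py | AFD_DatoTipoString
-- ===== SOURCE A (Python) =====
-- def  AFD_DatoTipoString(lexema):
--     estado=0
--     estados_aceptacion = [1]
--     for caracter in lexema:
--         if estado==0:
--             if caracter =='"':
--                 estado=1
--             else:
--                 estado=-1
--         elif estado==1:
--             if caracter.isalpha():
--                 estado=1
--             elif not caracter.isalpha():
--                 estado=1
--             else:
--                 estado=2
--         elif estado==2:
--             if caracter=='"':
--                 estado=1
--             else:
--                 estado=-1
--         if estado==-1: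
--             return False
--     return estado in estados_aceptacion
-- ===== SOURCE B (Python) =====
-- def AFD_DatoTipoString(lexema):
--     return lexema.startswith('"')
-- ===== Notes on version B (the rewrite author's own statement) =====
-- stated objective: simpler
-- what changed: Replaced the DFA loop (whose state-1 branch always loops back to 1, making state 2 unreachable) by the closed-form test that the string starts with a double quote.
import Mathlib
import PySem

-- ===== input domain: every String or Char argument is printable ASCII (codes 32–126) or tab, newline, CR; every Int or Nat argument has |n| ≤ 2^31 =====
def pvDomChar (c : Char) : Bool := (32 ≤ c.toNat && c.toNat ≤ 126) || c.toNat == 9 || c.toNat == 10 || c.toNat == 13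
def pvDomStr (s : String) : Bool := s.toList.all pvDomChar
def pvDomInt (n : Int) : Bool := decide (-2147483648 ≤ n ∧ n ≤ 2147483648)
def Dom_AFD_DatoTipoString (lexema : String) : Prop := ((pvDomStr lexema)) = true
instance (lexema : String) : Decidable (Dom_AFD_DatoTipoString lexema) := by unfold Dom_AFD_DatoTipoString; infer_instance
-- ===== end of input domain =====

-- B replaces A's DFA loop by the closed-form first-character test (state 2 is unreachable in A).

-- ===== PORT A =====
-- the for-loop with its early 'return False'; returns the final 'estado in estados_aceptacion'
def afdLoop (cs : List Char) (estado : Int) (estados_aceptacion : List Int) : Bool :=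
  match cs with
  | [] => estado ∈ estados_aceptacion
  | caracter :: rest =>
    let estado1 : Int :=
      if estado == 0 then (if caracter == '"' then 1 else -1)
      else if estado == 1 then
        (if PySem.Chars.isalpha caracter then 1
         else if ¬ PySem.Chars.isalpha caracter then 1 else 2)
      else if estado == 2 then (if caracter == '"' then 1 else -1)
      else estado
    if estado1 == -1 then false
    else afdLoop rest estado1 estados_aceptacion

def AFD_DatoTipoString (lexema : String) : Bool :=
  afdLoop lexema.toList 0 [1]

-- ===== PORT B =====
def AFD_DatoTipoString_alt (lexema : String) : Bool :=
  PySem.Str.startswith lexema "\""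

-- ===== PRECONDITION & SPEC =====
def Spec_AFD_DatoTipoString (lexema : String) (out : Bool) : Prop := out = AFD_DatoTipoString_alt lexema
instance (lexema : String) (out : Bool) : Decidable (Spec_AFD_DatoTipoString lexema out) := by unfold Spec_AFD_DatoTipoString; infer_instance

-- ===== CLAIM (what is proved, stated in full; the proofs are below) =====
def Claim_equal_AFD_DatoTipoString : Prop := ∀ (lexema : String), Dom_AFD_DatoTipoString lexema → Spec_AFD_DatoTipoString lexema (AFD_DatoTipoString lexema)

-- ===== LEMMAS AND PROOFS =====

-- from state 1 the loop always stays in state 1 and accepts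
theorem afdLoop_one (cs : List Char) : afdLoop cs 1 [1] = true := by
  induction cs with
  | nil => simp [afdLoop]
  | cons c rest ih =>
    simp only [afdLoop]
    by_cases h : PySem.Chars.isalpha c <;> simp [h, ih]

-- ===== VERDICT (by name: the statement is the Claim_ definition above) =====
theorem AFD_DatoTipoString_spec : Claim_equal_AFD_DatoTipoString := by
  intro lexema _
  unfold Spec_AFD_DatoTipoString AFD_DatoTipoString AFD_DatoTipoString_alt
  rw [PySem.Str.startswith_eq]
  cases h : lexema.toList with
  | nil => simp [afdLoop, PySem.Chars.startswith]
  | cons c rest =>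
    by_cases hc : c = '"'
    · subst hc
      simp [afdLoop, afdLoop_one, PySem.Chars.startswith]
    · have : (c == '"') = false := by simp [hc]
      simp [afdLoop, this, PySem.Chars.startswith, List.isPrefixOf]
      exact fun e => hc e.symm
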